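-- pv_equiv track=rewrite | github.com/Poissonismyson/python | Laboratori/Laboratorio_7/Es4/Es4.py | contaParole
-- ===== SOURCE A (Python) =====
-- def contaParole(frasi):
--     diz = {}
--     rem = set()
--     for i in frasi:
--         parole = i.split(' ')
--         for parola in parole:
--             if parola in diz:
--                 diz[parola] += 1
--                 rem.discard(parola)
--
--             else:
--                 diz[parola] = 1
--                 rem.add(parola)
--
--
--     for j in list(rem):
--         del diz[j]
--
--     return diz
-- ===== SOURCE B (Python) =====
-- def contaParole(frasi):
--     # Dict-free counting: flatten the phrases into one word list, take the
--     # distinct words in first-occurrence order (dict.fromkeys), and for each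
--     # one count its occurrences by scanning the word list; keep those > 1.
--     words = [parola for frase in frasi for parola in frase.split(' ')]
--     res = {}
--     for w in dict.fromkeys(words):
--         c = words.count(w)
--         if c > 1:
--             res[w] = c
--     return res
-- ===== Notes on version B (the rewrite author's own statement) =====
-- stated objective: alternative
-- what changed: B removes A's incremental dict+singleton-set bookkeeping entirely: it flattens the phrases into one word list and, for each distinct word in first-occurrence order (dict.fromkeys), counts it by scanning that list with list.count, keeping words with count > 1 - counting by repeated scans instead of a hash accumulator.
import Mathlib
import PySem

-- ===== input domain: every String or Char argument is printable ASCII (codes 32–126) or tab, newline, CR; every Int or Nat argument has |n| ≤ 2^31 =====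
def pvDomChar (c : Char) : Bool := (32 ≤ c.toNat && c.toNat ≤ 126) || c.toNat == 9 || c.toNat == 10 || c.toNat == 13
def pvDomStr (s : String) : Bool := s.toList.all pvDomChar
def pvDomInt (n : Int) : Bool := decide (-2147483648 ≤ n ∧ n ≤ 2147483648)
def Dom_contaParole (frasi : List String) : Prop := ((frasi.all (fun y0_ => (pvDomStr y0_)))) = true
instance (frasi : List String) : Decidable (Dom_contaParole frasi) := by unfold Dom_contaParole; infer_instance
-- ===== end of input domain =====

-- B drops A's dict/rem-set accumulators: it scans the flattened word list once per
-- distinct word with list.count and keeps counts > 1 (alternative algorithm, not faster).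


-- ===== PORT A =====
-- The final Python loop 'for j in list(rem): del diz[j]' consumes the set in hash order;
-- deleting keys from a dict is order-insensitive, so folding in the Set's insertion order is exact.
def contaParole (frasi : List String) : List (String × Int) :=
  let st := frasi.foldl
    (fun (st : PySem.Dict String Int × PySem.Set String) i =>
      ((PySem.Str.split? i " ").getD []).foldl
        (fun st parola =>
          if st.1.contains parola then
            (st.1.insert parola (st.1.getD parola 0 + 1), PySem.Set.discard st.2 parola)
          else
            (st.1.insert parola 1, PySem.Set.add st.2 parola))
        st)
    (PySem.Dict.empty, PySem.Set.empty)
  (st.2.foldl (fun d j => d.erase j) st.1).items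

-- ===== PORT B =====
-- Source B's loop runs over dict.fromkeys(words) (= PySem.List.dedup words), whose keys are
-- distinct, so the dict 'res' it builds is exactly this association list in order.
def contaParole_alt (frasi : List String) : List (String × Int) :=
  let words := frasi.flatMap (fun frase => (PySem.Str.split? frase " ").getD [])
  (PySem.List.dedup words).filterMap (fun w =>
    let c := words.count w
    if 1 < c then some (w, (c : Int)) else none)

-- ===== PRECONDITION & SPEC =====
def Spec_contaParole (frasi : List String) (out : List (String × Int)) : Prop := out = contaParole_alt frasi
instance (frasi : List String) (out : List (String × Int)) : Decidable (Spec_contaParole frasi out) := by unfold Spec_contaParole; infer_instance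

-- ===== CLAIM (what is proved, stated in full; the proofs are below) =====
def Claim_equal_contaParole : Prop := ∀ (frasi : List String), Dom_contaParole frasi → Spec_contaParole frasi (contaParole frasi)

-- ===== LEMMAS AND PROOFS =====

-- A's loop step over one word
def pvStepA (st : PySem.Dict String Int × PySem.Set String) (parola : String) :
    PySem.Dict String Int × PySem.Set String :=
  if st.1.contains parola then
    (st.1.insert parola (st.1.getD parola 0 + 1), PySem.Set.discard st.2 parola)
  else
    (st.1.insert parola 1, PySem.Set.add st.2 parola)

-- the dict component of A's fold counts the words
theorem pvFstA (ws : List String) (d : PySem.Dict String Int) (r : PySem.Set String) :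
    (ws.foldl pvStepA (d, r)).1 = ws.foldl (fun d w => d.insert w (d.getD w 0 + 1)) d := by
  induction ws generalizing d r with
  | nil => rfl
  | cons w ws ih =>
      simp only [List.foldl_cons]
      rw [pvStepA]
      by_cases h : d.contains w = true
      · simp [h, ih]
      · simp only [Bool.not_eq_true] at h
        simp [h, ih, PySem.Dict.getD_of_not_contains d (0 : Int) h]

-- the 'rem' set of A's fold holds exactly the words counted once so far
theorem pvSndA (ws : List String) (w : String) :
    w ∈ (ws.foldl pvStepA (PySem.Dict.empty, PySem.Set.empty)).2 ↔ List.count w ws = 1 := by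
  induction ws using List.reverseRecOn with
  | nil => simp [PySem.Set.empty]
  | append_singleton ws x ih =>
      rw [List.foldl_append, List.foldl_cons, List.foldl_nil]
      have hfst : (ws.foldl pvStepA (PySem.Dict.empty, PySem.Set.empty)).1
          = PySem.Dict.counter ws := by
        rw [pvFstA, PySem.Dict.foldl_insert_getD_add_one_eq_counter]
      rw [pvStepA]
      by_cases h : (ws.foldl pvStepA (PySem.Dict.empty, PySem.Set.empty)).1.contains x = true
      · have hx : x ∈ ws := by
          rw [hfst, PySem.Dict.contains_counter] at h
          simpa using h
        have hc : 1 ≤ List.count x ws := List.count_pos_iff.mpr hx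
        rw [if_pos h]
        rw [PySem.Set.mem_discard, ih, List.count_append, List.count_singleton]
        by_cases hwx : w = x
        · subst hwx; simp; omega
        · rw [if_neg (fun hh => hwx (eq_of_beq hh).symm)]
          simp [hwx]
      · have hx : x ∉ ws := by
          rw [hfst, PySem.Dict.contains_counter] at h
          simpa using h
        have hc : List.count x ws = 0 := List.count_eq_zero.mpr hx
        rw [if_neg h]
        rw [PySem.Set.mem_add, ih, List.count_append, List.count_singleton]
        by_cases hwx : w = x
        · subst hwx; simp [hc]
        · rw [if_neg (fun hh => hwx (eq_of_beq hh).symm)]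
          simp [hwx]

-- deleting every key of r from d filters d's items
theorem pvEraseFold (r : List String) (d : PySem.Dict String Int) :
    (r.foldl (fun d j => d.erase j) d).items
      = d.items.filter (fun p => !r.contains p.1) := by
  induction r generalizing d with
  | nil => simp
  | cons x r ih =>
      rw [List.foldl_cons, ih]
      have he : (d.erase x).items = d.items.filter (fun p => !p.1 == x) := rfl
      rw [he, List.filter_filter]
      apply List.filter_congr
      intro p _
      by_cases hpx : p.1 = x
      · simp [hpx]
      · simp [hpx, Bool.and_comm]

-- 'rem' membership as a boolean test
theorem pvContainsSnd (ws : List String) (k : String) :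
    List.contains (ws.foldl pvStepA (PySem.Dict.empty, PySem.Set.empty)).2 k
      = decide (List.count k ws = 1) := by
  by_cases h : List.count k ws = 1
  · have hm : k ∈ (ws.foldl pvStepA (PySem.Dict.empty, PySem.Set.empty)).2 :=
      (pvSndA ws k).mpr h
    simp only [h, decide_true]
    exact List.contains_iff_mem.mpr hm
  · have hn : k ∉ (ws.foldl pvStepA (PySem.Dict.empty, PySem.Set.empty)).2 :=
      fun hm => h ((pvSndA ws k).mp hm)
    simp only [h, decide_false]
    cases hb : List.contains (ws.foldl pvStepA (PySem.Dict.empty, PySem.Set.empty)).2 k with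
    | false => rfl
    | true => exact absurd (List.contains_iff_mem.mp hb) hn

-- filtering a mapped list is a filterMap over the source
theorem pvFilterMapOfFilter {α β : Type} (l : List α) (f : α → β) (p : β → Bool) :
    (l.map f).filter p = l.filterMap (fun x => if p (f x) then some (f x) else none) := by
  induction l with
  | nil => rfl
  | cons x l ih =>
      simp only [List.map_cons, List.filter_cons, List.filterMap_cons]
      by_cases h : p (f x) = true <;> simp [h, ih]

-- A's whole result over an arbitrary word list equals B's count-and-scan result
theorem contaParole_core (ws : List String) :
    ((ws.foldl pvStepA (PySem.Dict.empty, PySem.Set.empty)).2.foldl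
        (fun d j => d.erase j) (ws.foldl pvStepA (PySem.Dict.empty, PySem.Set.empty)).1).items
      = (PySem.List.dedup ws).filterMap (fun w =>
          if 1 < ws.count w then some (w, (ws.count w : Int)) else none) := by
  rw [pvEraseFold, pvFstA, PySem.Dict.foldl_insert_getD_add_one_eq_counter,
    PySem.Dict.items_counter, pvFilterMapOfFilter, PySem.List.dedup_eq_ofList]
  apply List.filterMap_congr
  intro k hk
  have hkw : k ∈ ws := (PySem.Set.mem_ofList ws k).mp hk
  have hc : 1 ≤ List.count k ws := List.count_pos_iff.mpr hkw
  dsimp only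
  rw [pvContainsSnd]
  by_cases h1 : List.count k ws = 1
  · simp [h1]
  · have h2 : 1 < List.count k ws := by omega
    have h2' : (1 : Int) < ((List.count k ws : Nat) : Int) := by exact_mod_cast h2
    simp [h1, h2]

-- ===== VERDICT (by name: the statement is the Claim_ definition above) =====
theorem contaParole_spec : Claim_equal_contaParole := by
  intro frasi _
  unfold Spec_contaParole contaParole contaParole_alt
  dsimp only
  rw [show (fun (st : PySem.Dict String Int × PySem.Set String) parola =>
        if st.1.contains parola then
          (st.1.insert parola (st.1.getD parola 0 + 1), PySem.Set.discard st.2 parola)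
        else
          (st.1.insert parola 1, PySem.Set.add st.2 parola)) = pvStepA from rfl]
  rw [← List.foldl_flatMap]
  exact contaParole_core _
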